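-- pv_equiv track=rewrite | github.com/CTStudyGroup/BOJ | _youn/boj_2229.py | solve
-- ===== SOURCE A (Python) =====
-- def solve(N, students):
--     dp = [0]*N
--     for i in range(N): # end
--         min_s, max_s = students[i], students[i]
--         for j in range(i, -1, -1): # start
--             min_s = min(min_s, students[j])
--             max_s = max(max_s, students[j])
--             if (i-j)+1 >=2:
--                 prev = dp[j-1] if j > 0 else 0
--                 dp[i] = max(dp[i], prev + (max_s-min_s))
--     return max(dp)
-- ===== SOURCE B (Python) =====
-- def solve(N, students):
--     # O(N) pass: in some optimal partition every non-singleton group carries its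
--     # max and min at its two endpoints, so a group scores |first - last|; splitting
--     # the absolute value into two cases gives two running maxima instead of an
--     # inner loop over group starts.
--     g = 0                # best score of the processed prefix
--     P = students[0]      # max over starts j of (best before j) + students[j]
--     M = -students[0]     # max over starts j of (best before j) - students[j]
--     for k in range(N):
--         v = students[k]
--         if g + v > P:
--             P = g + v
--         if g - v > M:
--             M = g - v
--         g = max(v + M, P - v)
--     return g
-- ===== Notes on version B (the rewrite author's own statement) =====
-- stated objective: faster
-- what changed: A fills an O(N^2) interval DP (for each end, an inner backward scan over starts maintaining segment min/max and reading dp[j-1]); B drops the DP array and inner loop entirely: since some optimal partition has every group's max and min at its endpoints, a group scores |first-last|, and splitting the absolute value into two cases reduces the whole problem to one forward pass maintaining two running maxima (best+value and best-value over group starts).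
import Mathlib
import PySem

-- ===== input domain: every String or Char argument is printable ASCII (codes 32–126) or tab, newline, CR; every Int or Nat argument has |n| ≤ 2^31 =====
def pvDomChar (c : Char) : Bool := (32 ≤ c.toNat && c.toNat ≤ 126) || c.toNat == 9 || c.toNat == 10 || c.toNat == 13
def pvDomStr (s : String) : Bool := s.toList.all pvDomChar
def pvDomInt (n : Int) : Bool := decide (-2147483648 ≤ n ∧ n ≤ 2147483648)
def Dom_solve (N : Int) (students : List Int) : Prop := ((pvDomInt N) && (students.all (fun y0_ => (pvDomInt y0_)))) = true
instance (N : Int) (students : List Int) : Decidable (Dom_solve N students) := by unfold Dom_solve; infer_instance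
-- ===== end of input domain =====

-- ONE-LINE SUMMARY: B replaces A's O(N^2) interval DP by a single O(N) pass with two
-- running maxima (groups may be assumed to carry their max/min at their endpoints).

-- ===== PORT A =====
-- literal transliteration of Source A's solve (for each end i, scan starts j = i..0 downward)
def solve (N : Int) (students : List Int) : Int :=
  let dp : List Int := PySem.List.pyRepeat [(0 : Int)] N
  let dp := (PySem.List.pyRange 0 N 1).foldl (fun dp i =>
    let s := PySem.List.pyGetD students i 0
    let st := (PySem.List.pyRange i (-1) (-1)).foldl
      (fun (st : Int × Int × List Int) j =>
        let mn := min st.1 (PySem.List.pyGetD students j 0)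
        let mx := max st.2.1 (PySem.List.pyGetD students j 0)
        let dp := st.2.2
        let dp := if (i - j) + 1 ≥ 2 then
            let prev := if j > 0 then PySem.List.pyGetD dp (j - 1) 0 else 0
            PySem.List.pySetD dp i (max (PySem.List.pyGetD dp i 0) (prev + (mx - mn)))
          else dp
        (mn, mx, dp)) (s, s, dp)
    st.2.2) dp
  (PySem.List.max? dp (fun y => y)).getD 0

-- ===== PORT B =====
-- literal transliteration of Source B's solve: one forward pass; g = best score of the
-- processed prefix, P/M = running maxima over starts j of (best before j) ± students[j]
def solve_alt (N : Int) (students : List Int) : Int :=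
  let g : Int := 0
  let P := PySem.List.pyGetD students 0 0
  let M := -(PySem.List.pyGetD students 0 0)
  let st := (PySem.List.pyRange 0 N 1).foldl (fun (st : Int × Int × Int) k =>
      let v := PySem.List.pyGetD students k 0
      let P := if st.1 + v > st.2.1 then st.1 + v else st.2.1
      let M := if st.1 - v > st.2.2 then st.1 - v else st.2.2
      (max (v + M) (P - v), P, M)) (g, P, M)
  st.1

-- ===== PRECONDITION & SPEC =====
-- Pre_ excludes exactly the inputs on which the Python A raises: N ≤ 0 (max() of an
-- empty list, ValueError) and N > len(students) (IndexError on students[i]).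
def Pre_solve (N : Int) (students : List Int) : Prop :=
  1 ≤ N ∧ N ≤ (students.length : Int)
instance (N : Int) (students : List Int) : Decidable (Pre_solve N students) := by
  unfold Pre_solve; infer_instance

def pvWitness_solve : Int × List Int := (4, [1, 7, 2, 5])

def Spec_solve (N : Int) (students : List Int) (out : Int) : Prop := out = solve_alt N students
instance (N : Int) (students : List Int) (out : Int) : Decidable (Spec_solve N students out) := by
  unfold Spec_solve; infer_instance

-- ===== CLAIM (what is proved, stated in full; the proofs are below) =====
def Claim_equal_solve : Prop := ∀ (N : Int) (students : List Int),
  Dom_solve N students → Pre_solve N students → Spec_solve N students (solve N students)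

-- ===== LEMMAS AND PROOFS =====

-- the contiguous segment xs[j+1..i] (as defaulted reads), and its running min / max from xs[j]
def segList (xs : List Int) (j i : Nat) : List Int :=
  (List.range (i - j)).map (fun t => xs.getD (j + 1 + t) 0)

def segMin (xs : List Int) (j i : Nat) : Int := (segList xs j i).foldl min (xs.getD j 0)
def segMax (xs : List Int) (j i : Nat) : Int := (segList xs j i).foldl max (xs.getD j 0)

theorem segList_self (xs : List Int) (j : Nat) : segList xs j j = [] := by
  simp [segList]

theorem segList_succ_right (xs : List Int) {j i : Nat} (h : j ≤ i) :
    segList xs j (i + 1) = segList xs j i ++ [xs.getD (i + 1) 0] := by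
  unfold segList
  rw [show i + 1 - j = (i - j) + 1 by omega, List.range_succ, List.map_append]
  simp only [List.map_cons, List.map_nil]
  rw [show j + 1 + (i - j) = i + 1 by omega]

theorem segList_cons_left (xs : List Int) {j i : Nat} (h : j < i) :
    segList xs j i = xs.getD (j + 1) 0 :: segList xs (j + 1) i := by
  unfold segList
  rw [show i - j = (i - (j + 1)) + 1 by omega, List.range_succ_eq_map]
  simp only [List.map_cons, List.map_map]
  refine congrArg₂ _ (by simp) (List.map_congr_left fun k hk => ?_)
  simp only [Function.comp_apply]
  rw [show j + 1 + (k + 1) = j + 1 + 1 + k by omega]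

theorem foldl_min_pull (L : List Int) (a b : Int) :
    L.foldl min (min a b) = min (L.foldl min b) a := by
  induction L generalizing b with
  | nil => exact min_comm a b
  | cons x L ih =>
    simp only [List.foldl_cons]
    rw [show min (min a b) x = min a (min b x) by omega, ih]

theorem foldl_max_pull (L : List Int) (a b : Int) :
    L.foldl max (max a b) = max (L.foldl max b) a := by
  induction L generalizing b with
  | nil => exact max_comm a b
  | cons x L ih =>
    simp only [List.foldl_cons]
    rw [show max (max a b) x = max a (max b x) by omega, ih]

theorem segMin_self (xs : List Int) (j : Nat) : segMin xs j j = xs.getD j 0 := by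
  simp [segMin, segList_self]

theorem segMax_self (xs : List Int) (j : Nat) : segMax xs j j = xs.getD j 0 := by
  simp [segMax, segList_self]

theorem segMin_succ_right (xs : List Int) {j i : Nat} (h : j ≤ i) :
    segMin xs j (i + 1) = min (segMin xs j i) (xs.getD (i + 1) 0) := by
  unfold segMin
  rw [segList_succ_right xs h, List.foldl_append, List.foldl_cons, List.foldl_nil]

theorem segMax_succ_right (xs : List Int) {j i : Nat} (h : j ≤ i) :
    segMax xs j (i + 1) = max (segMax xs j i) (xs.getD (i + 1) 0) := by
  unfold segMax
  rw [segList_succ_right xs h, List.foldl_append, List.foldl_cons, List.foldl_nil]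

theorem segMin_cons_left (xs : List Int) {j i : Nat} (h : j < i) :
    segMin xs j i = min (segMin xs (j + 1) i) (xs.getD j 0) := by
  unfold segMin
  rw [segList_cons_left xs h, List.foldl_cons, foldl_min_pull]

theorem segMax_cons_left (xs : List Int) {j i : Nat} (h : j < i) :
    segMax xs j i = max (segMax xs (j + 1) i) (xs.getD j 0) := by
  unfold segMax
  rw [segList_cons_left xs h, List.foldl_cons, foldl_max_pull]

-- the reference dp value: dpS xs i = best score of a prefix whose last group ends at index i
def dpS (xs : List Int) : Nat → Int
  | i =>
    (((List.range i).attach).map (fun j =>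
      (if j.1 = 0 then 0 else dpS xs (j.1 - 1)) + (segMax xs j.1 i - segMin xs j.1 i))).foldl max 0
decreasing_by
  have := List.mem_range.mp j.2
  omega

def preS (xs : List Int) (j : Nat) : Int := if j = 0 then 0 else dpS xs (j - 1)

def candS (xs : List Int) (j i : Nat) : Int := preS xs j + (segMax xs j i - segMin xs j i)

def partialS (xs : List Int) (i m : Nat) : Int :=
  ((List.range m).map (fun j => candS xs j i)).foldl max 0

theorem dpS_eq (xs : List Int) (i : Nat) : dpS xs i = partialS xs i i := by
  rw [dpS]
  unfold partialS candS preS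
  exact congrArg (List.foldl max 0) (List.attach_map_val
    (l := List.range i)
    (f := fun j => (if j = 0 then 0 else dpS xs (j - 1)) + (segMax xs j i - segMin xs j i)))

theorem range_map_rev (n : Nat) :
    (List.range n).map (fun k => n - 1 - k) = (List.range n).reverse := by
  induction n with
  | zero => rfl
  | succ n ih =>
    have h1 : (List.range (n + 1)).map (fun k => n + 1 - 1 - k)
        = n :: (List.range n).map (fun k => n - 1 - k) := by
      rw [List.range_succ_eq_map]
      simp only [List.map_cons, List.map_map]
      refine congrArg₂ _ (by omega) (List.map_congr_left fun k hk => by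
        simp only [Function.comp_apply]; omega)
    rw [h1, List.range_succ, List.reverse_append, ih]
    rfl

-- the descending candidate scan (A's inner loop order) computes the same partial maximum
theorem partialD_eq (xs : List Int) (i : Nat) :
    ((List.range i).map (fun k => candS xs (i - 1 - k) i)).foldl max 0 = partialS xs i i := by
  unfold partialS
  have h : (List.range i).map (fun k => candS xs (i - 1 - k) i)
      = ((List.range i).map (fun j => candS xs j i)).reverse := by
    rw [← List.map_reverse, ← range_map_rev, List.map_map]
    rfl
  rw [h]
  exact (List.reverse_perm _).foldl_eq 0

theorem set_map_range {n i : Nat} (g : Nat → Int) (v : Int) :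
    ((List.range n).map g).set i v = (List.range n).map (fun t => if t = i then v else g t) := by
  apply List.ext_getElem (by simp)
  intro k h1 h2
  simp only [List.getElem_set, List.getElem_map, List.getElem_range]
  split_ifs with h3 h4 h4 <;> first | rfl | omega

theorem if_gt_eq_max (a b : Int) : (if b > a then b else a) = max a b := by omega
theorem pvFoldlRangeEq {α : Type} (f : α → Nat → α) (E : Nat → α) (n : Nat)
    (hstep : ∀ k, k < n → f (E k) k = E (k + 1)) :
    (List.range n).foldl f (E 0) = E n := by
  induction n with
  | zero => rfl
  | succ n ih =>
    rw [List.range_succ, List.foldl_append, List.foldl_cons, List.foldl_nil,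
      ih (fun k hk => hstep k (Nat.lt_succ_of_lt hk)), hstep n (Nat.lt_succ_self n)]

theorem pvToNatNegOne (y : Nat) : ((y : Int) - -1).toNat = y + 1 := by omega

theorem pdS_succ (xs : List Int) (k m : Nat) (hm : 1 ≤ m) :
    ((List.range ((m + 1) - 1)).map (fun t => candS xs (k - 1 - t) k)).foldl max 0
      = max (((List.range (m - 1)).map (fun t => candS xs (k - 1 - t) k)).foldl max 0)
          (candS xs (k - m) k) := by
  rw [show (m + 1) - 1 = (m - 1) + 1 by omega, List.range_succ, List.map_append,
    List.foldl_append, List.map_cons, List.map_nil, List.foldl_cons, List.foldl_nil,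
    show k - 1 - (m - 1) = k - m by omega]

theorem solveA_eq (students : List Int) (n : Nat) :
    solve (n : Int) students
      = (PySem.List.max? ((List.range n).map (fun t => dpS students t)) (fun y => y)).getD 0 := by
  unfold solve
  simp only [PySem.List.pyRepeat_singleton, Int.toNat_natCast, PySem.List.pyRange_zero_natCast,
    List.foldl_map, PySem.List.pyRange_neg_one, PySem.List.pyGetD_natCast, pvToNatNegOne]
  refine congrArg (fun L => (PySem.List.max? L (fun y => y)).getD 0) ?_
  rw [show List.replicate n (0 : Int)
      = (List.range n).map (fun t => if t < 0 then dpS students t else 0) by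
    rw [List.map_congr_left (g := fun _ => (0 : Int)) (fun t _ => by simp)]
    simp [List.map_const']]
  refine Eq.trans (pvFoldlRangeEq _
      (fun k => (List.range n).map (fun t => if t < k then dpS students t else 0)) n ?_) ?_
  · intro k hk
    simp only []
    -- rewrite the inner initial dp into the m = 0 shape of the inner invariant
    rw [List.map_congr_left (l := List.range n)
        (f := fun t => if t < k then dpS students t else 0)
        (g := fun t => if t = k then
            ((List.range (0 - 1)).map (fun t2 => candS students (k - 1 - t2) k)).foldl max 0
          else if t < k then dpS students t else 0)
        (fun t _ => by by_cases h : t = k <;> simp [h])]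
    refine Eq.trans (congrArg (fun st => st.2.2) (pvFoldlRangeEq _
        (fun m => ((if m = 0 then students.getD k 0 else segMin students (k + 1 - m) k),
          (if m = 0 then students.getD k 0 else segMax students (k + 1 - m) k),
          (List.range n).map (fun t => if t = k then
              ((List.range (m - 1)).map (fun t2 => candS students (k - 1 - t2) k)).foldl max 0
            else if t < k then dpS students t else 0))) (k + 1) ?_)) ?_
    · intro m hm
      simp only []
      rw [show ((k : Int) - (m : Int)) = ((k - m : Nat) : Int) by omega,
        PySem.List.pyGetD_natCast]
      have h1 : min (if m = 0 then students.getD k 0 else segMin students (k + 1 - m) k)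
          (students.getD (k - m) 0)
          = (if m + 1 = 0 then students.getD k 0 else segMin students (k + 1 - (m + 1)) k) := by
        rcases Nat.eq_zero_or_pos m with h0 | h0
        · subst h0
          simp [segMin_self]
        · rw [if_neg (by omega), if_neg (by omega)]
          rw [show k + 1 - (m + 1) = k - m by omega]
          rw [segMin_cons_left students (j := k - m) (i := k) (by omega)]
          rw [show k - m + 1 = k + 1 - m by omega]
      have h2 : max (if m = 0 then students.getD k 0 else segMax students (k + 1 - m) k)
          (students.getD (k - m) 0)
          = (if m + 1 = 0 then students.getD k 0 else segMax students (k + 1 - (m + 1)) k) := by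
        rcases Nat.eq_zero_or_pos m with h0 | h0
        · subst h0
          simp [segMax_self]
        · rw [if_neg (by omega), if_neg (by omega)]
          rw [show k + 1 - (m + 1) = k - m by omega]
          rw [segMax_cons_left students (j := k - m) (i := k) (by omega)]
          rw [show k - m + 1 = k + 1 - m by omega]
      refine congrArg₂ Prod.mk h1 (congrArg₂ Prod.mk h2 ?_)
      rcases Nat.eq_zero_or_pos m with h0 | h0
      · subst h0
        rw [if_neg (by omega)]
      · rw [if_pos (by omega)]
        have hprev : (if ((k - m : Nat) : Int) > 0
              then PySem.List.pyGetD ((List.range n).map (fun t => if t = k then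
                  ((List.range (m - 1)).map (fun t2 => candS students (k - 1 - t2) k)).foldl max 0
                else if t < k then dpS students t else 0)) (((k - m : Nat) : Int) - 1) 0
              else 0) = preS students (k - m) := by
          by_cases hkm : k = m
          · rw [if_neg (by omega), preS, if_pos (by omega)]
          · rw [if_pos (by omega),
              show (((k - m : Nat) : Int) - 1) = ((k - m - 1 : Nat) : Int) by omega,
              PySem.List.pyGetD_natCast,
              PySem.List.getD_map_range _ _ _ _ (by omega : k - m - 1 < n),
              if_neg (by omega), if_pos (by omega), preS, if_neg (by omega)]
        rw [hprev, h1, h2,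
          PySem.List.getD_map_range _ _ _ _ (by omega : k < n), if_pos rfl,
          PySem.List.pySetD_natCast, set_map_range]
        refine List.map_congr_left (fun t _ => ?_)
        by_cases ht : t = k
        · subst ht
          rw [if_pos rfl, if_pos rfl, pdS_succ students t m h0,
            if_neg (by omega), if_neg (by omega),
            show t + 1 - (m + 1) = t - m by omega]
          rfl
        · rw [if_neg ht, if_neg ht, if_neg ht]
    · simp only []
      refine List.map_congr_left (fun t ht => ?_)
      by_cases htk : t = k
      · subst htk
        rw [if_pos rfl, if_pos (by omega), show t + 1 - 1 = t by omega, partialD_eq, ← dpS_eq]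
      · rw [if_neg htk]
        by_cases htl : t < k
        · rw [if_pos htl, if_pos (by omega)]
        · rw [if_neg htl, if_neg (by omega)]
  · exact List.map_congr_left (fun t ht => by rw [if_pos (List.mem_range.mp ht)])

-- ===== the endpoint-score recurrence E (B's mathematical reference) =====

-- E xs i = best score of the prefix ending at i when each group scores |first - last|
def E (xs : List Int) : Nat → Int
  | i =>
    (((List.range (i + 1)).attach).map (fun j =>
      (if _h : j.1 = 0 then 0 else E xs (j.1 - 1))
        + |xs.getD i 0 - xs.getD j.1 0|)).foldl max 0
decreasing_by
  have := List.mem_range.mp j.2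
  omega

def preE (xs : List Int) (j : Nat) : Int := if _h : j = 0 then 0 else E xs (j - 1)

def termE (xs : List Int) (i j : Nat) : Int := preE xs j + |xs.getD i 0 - xs.getD j 0|

theorem E_eq (xs : List Int) (i : Nat) :
    E xs i = ((List.range (i + 1)).map (termE xs i)).foldl max 0 := by
  rw [E]
  unfold termE preE
  exact congrArg (List.foldl max 0) (List.attach_map_val
    (l := List.range (i + 1))
    (f := fun j => (if _h : j = 0 then 0 else E xs (j - 1)) + |xs.getD i 0 - xs.getD j 0|))

theorem pvFoldlMaxLe {L : List Int} {a c : Int} (ha : a ≤ c) (h : ∀ x ∈ L, x ≤ c) :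
    L.foldl max a ≤ c := by
  rcases PySem.List.foldl_max_mem L a with h1 | h1
  · exact le_of_eq_of_le h1 ha
  · exact h _ h1

theorem termE_le_E (xs : List Int) {i j : Nat} (h : j ≤ i) : termE xs i j ≤ E xs i := by
  rw [E_eq]
  exact (PySem.List.le_foldl_max _ _).2 _
    (List.mem_map.mpr ⟨j, List.mem_range.mpr (by omega), rfl⟩)

theorem E_nonneg (xs : List Int) (i : Nat) : 0 ≤ E xs i := by
  rw [E_eq]; exact (PySem.List.le_foldl_max _ _).1

theorem preE_zero (xs : List Int) : preE xs 0 = 0 := by simp [preE]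

theorem preE_succ (xs : List Int) (t : Nat) : preE xs (t + 1) = E xs t := by simp [preE]

theorem preE_nonneg (xs : List Int) (j : Nat) : 0 ≤ preE xs j := by
  cases j with
  | zero => rw [preE_zero]
  | succ t => rw [preE_succ]; exact E_nonneg xs t

theorem E_mono_succ (xs : List Int) (i : Nat) : E xs i ≤ E xs (i + 1) := by
  have h : termE xs (i + 1) (i + 1) = E xs i := by
    simp [termE, preE_succ]
  exact h ▸ termE_le_E xs (le_refl (i + 1))

theorem E_mono (xs : List Int) {a b : Nat} (h : a ≤ b) : E xs a ≤ E xs b := by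
  induction b with
  | zero => exact (show a = 0 by omega) ▸ le_refl _
  | succ b ih =>
    by_cases ha : a ≤ b
    · exact le_trans (ih ha) (E_mono_succ xs b)
    · exact (show a = b + 1 by omega) ▸ le_refl _

theorem dpS_nonneg (xs : List Int) (i : Nat) : 0 ≤ dpS xs i := by
  rw [dpS_eq]; exact (PySem.List.le_foldl_max _ _).1

theorem candS_le_dpS (xs : List Int) {j i : Nat} (h : j < i) : candS xs j i ≤ dpS xs i := by
  rw [dpS_eq]
  exact (PySem.List.le_foldl_max _ _).2 _
    (List.mem_map.mpr ⟨j, List.mem_range.mpr h, rfl⟩)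

theorem dpS_mono_succ (xs : List Int) (i : Nat) : dpS xs i ≤ dpS xs (i + 1) := by
  rw [dpS_eq xs i]
  apply pvFoldlMaxLe (dpS_nonneg xs (i + 1))
  intro x hx
  obtain ⟨j, hj, rfl⟩ := List.mem_map.mp hx
  have hji : j < i := List.mem_range.mp hj
  have hgrow : candS xs j i ≤ candS xs j (i + 1) := by
    unfold candS
    rw [segMax_succ_right xs (by omega : j ≤ i), segMin_succ_right xs (by omega : j ≤ i)]
    have := le_max_left (segMax xs j i) (xs.getD (i + 1) 0)
    have := min_le_left (segMin xs j i) (xs.getD (i + 1) 0)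
    omega
  exact le_trans hgrow (candS_le_dpS xs (by omega))

theorem dpS_mono (xs : List Int) {a b : Nat} (h : a ≤ b) : dpS xs a ≤ dpS xs b := by
  induction b with
  | zero => exact (show a = 0 by omega) ▸ le_refl _
  | succ b ih =>
    by_cases ha : a ≤ b
    · exact le_trans (ih ha) (dpS_mono_succ xs b)
    · exact (show a = b + 1 by omega) ▸ le_refl _

theorem segMin_le_seed (xs : List Int) (j i : Nat) : segMin xs j i ≤ xs.getD j 0 :=
  (PySem.List.foldl_min_le _ _).1

theorem seed_le_segMax (xs : List Int) (j i : Nat) : xs.getD j 0 ≤ segMax xs j i :=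
  (PySem.List.le_foldl_max _ _).1

theorem getD_mem_segList (xs : List Int) {j i : Nat} (h : j < i) :
    xs.getD i 0 ∈ segList xs j i := by
  unfold segList
  exact List.mem_map.mpr ⟨i - j - 1, List.mem_range.mpr (by omega),
    by rw [show j + 1 + (i - j - 1) = i by omega]⟩

theorem absBound (xs : List Int) {j i : Nat} (h : j ≤ i) :
    |xs.getD i 0 - xs.getD j 0| ≤ segMax xs j i - segMin xs j i := by
  rcases Nat.eq_or_lt_of_le h with he | hlt
  · subst he
    rw [sub_self, abs_zero, segMax_self, segMin_self]
    omega
  · have h1 : xs.getD i 0 ≤ segMax xs j i :=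
      (PySem.List.le_foldl_max _ _).2 _ (getD_mem_segList xs hlt)
    have h2 : segMin xs j i ≤ xs.getD i 0 :=
      (PySem.List.foldl_min_le _ _).2 _ (getD_mem_segList xs hlt)
    have h3 := seed_le_segMax xs j i
    have h4 := segMin_le_seed xs j i
    rw [abs_le]
    omega

theorem segMax_attain (xs : List Int) {j i : Nat} (h : j ≤ i) :
    ∃ m, j ≤ m ∧ m ≤ i ∧ xs.getD m 0 = segMax xs j i := by
  rcases PySem.List.foldl_max_mem (segList xs j i) (xs.getD j 0) with h1 | h1
  · exact ⟨j, le_refl j, h, h1.symm⟩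
  · obtain ⟨t, ht, he⟩ := List.mem_map.mp h1
    exact ⟨j + 1 + t, by omega, by have := List.mem_range.mp ht; omega, he⟩

theorem segMin_attain (xs : List Int) {j i : Nat} (h : j ≤ i) :
    ∃ p, j ≤ p ∧ p ≤ i ∧ xs.getD p 0 = segMin xs j i := by
  rcases PySem.List.foldl_min_mem (segList xs j i) (xs.getD j 0) with h1 | h1
  · exact ⟨j, le_refl j, h, h1.symm⟩
  · obtain ⟨t, ht, he⟩ := List.mem_map.mp h1
    exact ⟨j + 1 + t, by omega, by have := List.mem_range.mp ht; omega, he⟩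

theorem E_le_dpS (xs : List Int) : ∀ i, E xs i ≤ dpS xs i := by
  intro i
  induction i using Nat.strong_induction_on with
  | _ i ih =>
    rw [E_eq]
    apply pvFoldlMaxLe (dpS_nonneg xs i)
    intro x hx
    obtain ⟨j, hj, rfl⟩ := List.mem_map.mp hx
    have hji : j ≤ i := by have := List.mem_range.mp hj; omega
    have h1 : preE xs j ≤ preS xs j := by
      cases j with
      | zero => simp [preE_zero, preS]
      | succ t =>
        have ht : t < i := by omega
        rw [preE_succ]
        simpa [preS] using ih t ht
    have h2 : termE xs i j ≤ candS xs j i := by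
      unfold termE candS
      have := absBound xs hji
      omega
    rcases Nat.eq_or_lt_of_le hji with he | hlt
    · subst he
      have h3 : candS xs j j = preS xs j := by
        unfold candS
        rw [segMax_self, segMin_self]; omega
      have h4 : preS xs j ≤ dpS xs j := by
        cases j with
        | zero => exact dpS_nonneg xs 0
        | succ t =>
          simp only [preS, Nat.succ_sub_one, if_neg (Nat.succ_ne_zero t)]
          exact dpS_mono xs (by omega)
      omega
    · exact le_trans h2 (candS_le_dpS xs hlt)

theorem dpS_le_E (xs : List Int) : ∀ i, dpS xs i ≤ E xs i := by
  intro i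
  induction i using Nat.strong_induction_on with
  | _ i ih =>
    rw [dpS_eq]
    unfold partialS
    apply pvFoldlMaxLe (E_nonneg xs i)
    intro x hx
    obtain ⟨j, hj, rfl⟩ := List.mem_map.mp hx
    have hji : j < i := List.mem_range.mp hj
    obtain ⟨m, hm1, hm2, hmv⟩ := segMax_attain xs (le_of_lt hji)
    obtain ⟨p, hp1, hp2, hpv⟩ := segMin_attain xs (le_of_lt hji)
    have hmm : segMin xs j i ≤ segMax xs j i :=
      le_trans (segMin_le_seed xs j i) (seed_le_segMax xs j i)
    have main : ∀ lo hi : Nat, j ≤ lo → lo ≤ hi → hi ≤ i →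
        |xs.getD hi 0 - xs.getD lo 0| = segMax xs j i - segMin xs j i →
        candS xs j i ≤ E xs i := by
      intro lo hi hjlo hlohi hhii habs
      have hpre : preS xs j ≤ preE xs lo := by
        cases j with
        | zero => simpa [preS] using preE_nonneg xs lo
        | succ t =>
          obtain ⟨s, rfl⟩ : ∃ s, lo = s + 1 := ⟨lo - 1, by omega⟩
          simp only [preS, Nat.succ_sub_one, if_neg (Nat.succ_ne_zero t)]
          rw [preE_succ]
          exact le_trans (ih t (by omega)) (E_mono xs (by omega : t ≤ s))
      have hterm : candS xs j i ≤ termE xs hi lo := by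
        unfold candS termE
        omega
      exact le_trans hterm (le_trans (termE_le_E xs hlohi) (E_mono xs hhii))
    rcases le_total m p with hmp | hmp
    · refine main m p hm1 hmp hp2 ?_
      rw [hmv, hpv, abs_sub_comm, abs_of_nonneg (by omega)]
    · refine main p m hp1 hmp hm2 ?_
      rw [hmv, hpv, abs_of_nonneg (by omega)]

-- ===== B's running maxima =====

def Pk (xs : List Int) (k : Nat) : Int :=
  ((List.range k).map (fun j => preE xs j + xs.getD j 0)).foldl max (xs.getD 0 0)

def Mk (xs : List Int) (k : Nat) : Int :=
  ((List.range k).map (fun j => preE xs j - xs.getD j 0)).foldl max (-(xs.getD 0 0))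

theorem Pk_succ (xs : List Int) (k : Nat) :
    Pk xs (k + 1) = max (Pk xs k) (preE xs k + xs.getD k 0) := by
  unfold Pk
  rw [List.range_succ, List.map_append, List.foldl_append, List.map_cons, List.map_nil,
    List.foldl_cons, List.foldl_nil]

theorem Mk_succ (xs : List Int) (k : Nat) :
    Mk xs (k + 1) = max (Mk xs k) (preE xs k - xs.getD k 0) := by
  unfold Mk
  rw [List.range_succ, List.map_append, List.foldl_append, List.map_cons, List.map_nil,
    List.foldl_cons, List.foldl_nil]

theorem le_Pk (xs : List Int) {j k : Nat} (h : j ≤ k) :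
    preE xs j + xs.getD j 0 ≤ Pk xs (k + 1) :=
  (PySem.List.le_foldl_max _ _).2 _ (List.mem_map.mpr ⟨j, List.mem_range.mpr (by omega), rfl⟩)

theorem le_Mk (xs : List Int) {j k : Nat} (h : j ≤ k) :
    preE xs j - xs.getD j 0 ≤ Mk xs (k + 1) :=
  (PySem.List.le_foldl_max _ _).2 _ (List.mem_map.mpr ⟨j, List.mem_range.mpr (by omega), rfl⟩)

theorem g_step (xs : List Int) (k : Nat) :
    max (xs.getD k 0 + Mk xs (k + 1)) (Pk xs (k + 1) - xs.getD k 0) = E xs k := by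
  apply le_antisymm
  · apply max_le
    · have hM : Mk xs (k + 1) ≤ E xs k - xs.getD k 0 := by
        apply pvFoldlMaxLe
        · have h0 := termE_le_E xs (Nat.zero_le k)
          simp only [termE, preE_zero, zero_add] at h0
          have := le_abs_self (xs.getD k 0 - xs.getD 0 0)
          linarith
        · intro x hx
          obtain ⟨j, hj, rfl⟩ := List.mem_map.mp hx
          have hjk : j ≤ k := by have := List.mem_range.mp hj; omega
          have ht := termE_le_E xs hjk
          simp only [termE] at ht
          have := le_abs_self (xs.getD k 0 - xs.getD j 0)
          linarith
      linarith
    · have hP : Pk xs (k + 1) ≤ E xs k + xs.getD k 0 := by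
        apply pvFoldlMaxLe
        · have h0 := termE_le_E xs (Nat.zero_le k)
          simp only [termE, preE_zero, zero_add] at h0
          have := neg_abs_le (xs.getD k 0 - xs.getD 0 0)
          linarith
        · intro x hx
          obtain ⟨j, hj, rfl⟩ := List.mem_map.mp hx
          have hjk : j ≤ k := by have := List.mem_range.mp hj; omega
          have ht := termE_le_E xs hjk
          simp only [termE] at ht
          have := neg_abs_le (xs.getD k 0 - xs.getD j 0)
          linarith
      linarith
  · rw [E_eq]
    apply pvFoldlMaxLe
    · have h1 := le_Pk xs (le_refl k)
      have h2 := preE_nonneg xs k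
      exact le_trans (by linarith : (0 : Int) ≤ Pk xs (k + 1) - xs.getD k 0) (le_max_right _ _)
    · intro x hx
      obtain ⟨j, hj, rfl⟩ := List.mem_map.mp hx
      have hjk : j ≤ k := by have := List.mem_range.mp hj; omega
      have hP := le_Pk xs hjk
      have hM := le_Mk xs hjk
      simp only [termE]
      rcases le_total (xs.getD j 0) (xs.getD k 0) with h | h
      · rw [abs_of_nonneg (by linarith)]
        exact le_trans (by linarith) (le_max_left _ _)
      · rw [abs_of_nonpos (by linarith)]
        exact le_trans (by linarith) (le_max_right _ _)

theorem solveB_eq (students : List Int) (n : Nat) (hn : 1 ≤ n) :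
    solve_alt (n : Int) students = E students (n - 1) := by
  unfold solve_alt
  simp only [PySem.List.pyRange_zero_natCast, List.foldl_map]
  have hget0 : PySem.List.pyGetD students 0 0 = students.getD 0 0 :=
    PySem.List.pyGetD_ofNat' students 0 0
  have hinit : ((0 : Int), PySem.List.pyGetD students 0 0, -(PySem.List.pyGetD students 0 0))
      = (preE students 0, Pk students 0, Mk students 0) := by
    rw [hget0, preE_zero]
    rfl
  rw [hinit]
  rw [congrArg (fun st : Int × Int × Int => st.1) (pvFoldlRangeEq _
    (fun k => (preE students k, Pk students k, Mk students k)) n ?step)]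
  · show preE students n = E students (n - 1)
    obtain ⟨s, rfl⟩ : ∃ s, n = s + 1 := ⟨n - 1, by omega⟩
    rw [preE_succ, Nat.succ_sub_one]
  · intro k hk
    simp only [PySem.List.pyGetD_natCast]
    have hPif : (if preE students k + students.getD k 0 > Pk students k
          then preE students k + students.getD k 0 else Pk students k)
        = Pk students (k + 1) := by
      rw [if_gt_eq_max, ← Pk_succ]
    have hMif : (if preE students k - students.getD k 0 > Mk students k
          then preE students k - students.getD k 0 else Mk students k)
        = Mk students (k + 1) := by
      rw [if_gt_eq_max, ← Mk_succ]
    show (let v := students.getD k 0;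
      let P := if preE students k + v > Pk students k then preE students k + v else Pk students k;
      let M := if preE students k - v > Mk students k then preE students k - v else Mk students k;
      ((max (v + M) (P - v), P, M) : Int × Int × Int))
        = (preE students (k + 1), Pk students (k + 1), Mk students (k + 1))
    simp only [hPif, hMif]
    rw [g_step, preE_succ]

theorem ansA_eq (students : List Int) (n : Nat) (hn : 1 ≤ n) :
    (PySem.List.max? ((List.range n).map (fun t => dpS students t)) (fun y => y)).getD 0
      = dpS students (n - 1) := by
  cases hmax : PySem.List.max? ((List.range n).map (fun t => dpS students t)) (fun y => y) with
  | none =>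
    exfalso
    have := (PySem.List.max?_eq_none_iff
      (xs := (List.range n).map (fun t => dpS students t)) (key := fun y => y)).mp hmax
    have hne : (List.range n).map (fun t => dpS students t) ≠ [] := by
      simp [List.map_eq_nil_iff, List.range_eq_nil]
      omega
    exact hne this
  | some m =>
    have hmem := PySem.List.max?_mem hmax
    obtain ⟨t, ht, rfl⟩ := List.mem_map.mp hmem
    have htn : t < n := List.mem_range.mp ht
    have hmax' := PySem.List.max?_isMax hmax
    have h1 : dpS students t ≤ dpS students (n - 1) := dpS_mono students (by omega)
    have h2 : dpS students (n - 1) ≤ dpS students t :=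
      hmax' _ (List.mem_map.mpr ⟨n - 1, List.mem_range.mpr (by omega), rfl⟩)
    simp only [Option.getD_some]
    omega

-- ===== VERDICT (by name: the statement is the Claim_ definition above) =====
theorem solve_spec : Claim_equal_solve := by
  unfold Claim_equal_solve Spec_solve
  intro N students _ hpre
  obtain ⟨h1, h2⟩ := hpre
  rw [show N = ((N.toNat : Nat) : Int) by omega,
    solveA_eq, solveB_eq students N.toNat (by omega),
    ansA_eq students N.toNat (by omega)]
  exact le_antisymm (dpS_le_E students (N.toNat - 1)) (E_le_dpS students (N.toNat - 1))
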